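-- pv_equiv track=rewrite | github.com/le-chartreux/pyprocgen | packages/p_board_functions.py | f_is_it_a_seed
-- ===== SOURCE A (Python) =====
-- def f_is_it_a_seed(v_seed_compressed):
--     # =============================
--     # INFORMATIONS :
--     # -----------------------------
--     # UTILITE :
--     # Vérifie que v_seed_compressed est bien
--     # de la forme a + ":" + b + ":" + c + ":" + d
--     # avec a,b,c,d str(integers)
--     # -----------------------------
--     # PRECONDITIONS :
--     # - v_seed_compressed : string
--     # -----------------------------
--     # DEPEND DE :
--     # - None
--     # -----------------------------
--     # UTILISE PAR :
--     # - procedural_generation_2D.py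
--     # =============================
--     v_compteur_deux_points = 0
--     v_compteur_position = 0
--     v_nb_deux_points_suite = 1    # Initialisé à 1 pour contrer le cas où v_seed_compressed[0] = ":"
--     v_caracteres_possibles = ("0123456789-:")
--
--     while (
--         v_compteur_position < len(v_seed_compressed)
--         and v_seed_compressed[v_compteur_position] in v_caracteres_possibles
--         and v_nb_deux_points_suite != 2
--         # Pour eviter un - au milieu d'un entier :
--         and not (v_compteur_position != 0 and v_seed_compressed[v_compteur_position] == "-" and v_seed_compressed[v_compteur_position - 1] != ":")
--     ):
--
--         if v_seed_compressed[v_compteur_position] == ":":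
--             v_compteur_deux_points += 1
--             v_nb_deux_points_suite += 1
--
--         else:
--             v_nb_deux_points_suite = 0
--
--         v_compteur_position += 1
--
--     return (
--         v_compteur_position == len(v_seed_compressed)
--         and v_compteur_deux_points == 3
--         and v_nb_deux_points_suite == 0
--     )
-- ===== SOURCE B (Python) =====
-- def f_is_it_a_seed(v_seed_compressed):
--     # B: split on ':' and validate each of the 4 segments independently
--     # (a segment is non-empty, an optional leading '-', then only digits;
--     # a lone '-' counts, matching A's acceptance of '-' segments).
--     parts = v_seed_compressed.split(':')
--     if len(parts) != 4:
--         return False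
--     for p in parts:
--         if not p:
--             return False
--         body = p[1:] if p[0] == '-' else p
--         if not all(c in '0123456789' for c in body):
--             return False
--     return True
-- ===== Notes on version B (the rewrite author's own statement) =====
-- stated objective: simpler
-- what changed: Replaces A's fused single-pass state machine (colon counter, consecutive-colon counter, previous-character minus rule) with a split on the colon separator followed by an independent per-segment check (non-empty, optional leading minus sign, then digits).
import Mathlib
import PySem

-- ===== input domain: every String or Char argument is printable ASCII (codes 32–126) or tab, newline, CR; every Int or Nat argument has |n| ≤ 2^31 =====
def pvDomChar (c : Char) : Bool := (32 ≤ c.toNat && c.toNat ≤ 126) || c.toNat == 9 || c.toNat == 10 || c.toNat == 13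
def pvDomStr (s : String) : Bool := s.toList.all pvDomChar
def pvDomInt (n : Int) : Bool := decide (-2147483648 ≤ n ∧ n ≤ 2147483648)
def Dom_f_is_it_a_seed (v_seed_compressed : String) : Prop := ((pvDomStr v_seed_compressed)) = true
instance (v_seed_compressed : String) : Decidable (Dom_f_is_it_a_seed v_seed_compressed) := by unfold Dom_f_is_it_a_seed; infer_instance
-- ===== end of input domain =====

-- B replaces A's fused single-pass colon-counting state machine by a split on the
-- colon separator followed by an independent per-segment check (objective: simpler).

-- ===== PORT A =====
-- Python: c in "0123456789-:"  (A's v_caracteres_possibles)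
def pvIsSeedChar (c : Char) : Bool := c ∈ "0123456789-:".toList

-- the while loop of A: state = (remaining characters, previous character
-- (none ⟺ position 0), colon counter, consecutive-colon counter); returns the
-- final (colon counter, consecutive-colon counter, position reached the end?)
def pvALoop : List Char → Option Char → Int → Int → Int × Int × Bool
  | [], _, colons, suite => (colons, suite, true)
  | c :: rest, prev, colons, suite =>
    if pvIsSeedChar c = true ∧ suite ≠ 2 ∧
       ¬(prev.isSome ∧ c = '-' ∧ prev ≠ some ':') then
      if c = ':' then pvALoop rest (some c) (colons + 1) (suite + 1)
      else pvALoop rest (some c) colons 0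
    else (colons, suite, false)

def f_is_it_a_seed (v_seed_compressed : String) : Bool :=
  let r := pvALoop v_seed_compressed.toList none 0 1
  r.2.2 && (r.1 == 3) && (r.2.1 == 0)

-- ===== PORT B =====
-- Python: c in '0123456789'
def pvIsDigit (c : Char) : Bool := c ∈ "0123456789".toList

-- a segment is non-empty: an optional leading '-', then only digits
def pvOkSeg (p : List Char) : Bool :=
  match p with
  | [] => false
  | c :: rest => (if c = '-' then rest else c :: rest).all pvIsDigit

def f_is_it_a_seed_alt (v_seed_compressed : String) : Bool :=
  let parts := v_seed_compressed.toList.splitOn ':'   -- Python str.split(':')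
  (parts.length == 4) && parts.all pvOkSeg

-- ===== PRECONDITION & SPEC =====
def Spec_f_is_it_a_seed (v_seed_compressed : String) (out : Bool) : Prop := out = f_is_it_a_seed_alt v_seed_compressed
instance (v_seed_compressed : String) (out : Bool) : Decidable (Spec_f_is_it_a_seed v_seed_compressed out) := by unfold Spec_f_is_it_a_seed; infer_instance

-- ===== CLAIM (what is proved, stated in full; the proofs are below) =====
def Claim_equal_f_is_it_a_seed : Prop := ∀ (v_seed_compressed : String), Dom_f_is_it_a_seed v_seed_compressed → Spec_f_is_it_a_seed v_seed_compressed (f_is_it_a_seed v_seed_compressed)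

-- ===== LEMMAS AND PROOFS =====

lemma pvSeedChar_iff (c : Char) :
    pvIsSeedChar c = true ↔ (pvIsDigit c = true ∨ c = '-' ∨ c = ':') := by
  simp only [pvIsSeedChar, pvIsDigit]
  simp
  tauto

-- common reference automaton: pvSpec started t cs holds iff cs is a well-formed
-- suffix, given that `started` says at least one character of the current
-- segment has been read, and t more ':' separators are still required.
def pvSpec (started : Bool) (t : Int) : List Char → Bool
  | [] => started && (t == 0)
  | c :: rest =>
    if c = ':' then started && pvSpec false (t - 1) rest
    else if c = '-' then !started && pvSpec true t rest
    else pvIsDigit c && pvSpec true t rest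

-- A's verdict from an arbitrary loop state
def pvAFin (cs : List Char) (prev : Option Char) (colons suite : Int) : Bool :=
  let r := pvALoop cs prev colons suite
  r.2.2 && (r.1 == 3) && (r.2.1 == 0)

lemma pvAFin_nil (prev : Option Char) (colons suite : Int) :
    pvAFin [] prev colons suite = ((colons == 3) && (suite == 0)) := by
  simp [pvAFin, pvALoop]

lemma pvAFin_cons_stop {c : Char} {prev : Option Char} {suite : Int}
    (rest : List Char) (colons : Int)
    (h : ¬(pvIsSeedChar c = true ∧ suite ≠ 2 ∧ ¬(prev.isSome ∧ c = '-' ∧ prev ≠ some ':'))) :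
    pvAFin (c :: rest) prev colons suite = false := by
  simp only [pvAFin, pvALoop, if_neg h]
  simp

lemma pvAFin_cons_go {c : Char} {prev : Option Char} {suite : Int}
    (rest : List Char) (colons : Int)
    (h : pvIsSeedChar c = true ∧ suite ≠ 2 ∧ ¬(prev.isSome ∧ c = '-' ∧ prev ≠ some ':')) :
    pvAFin (c :: rest) prev colons suite
      = if c = ':' then pvAFin rest (some c) (colons + 1) (suite + 1)
        else pvAFin rest (some c) colons 0 := by
  simp only [pvAFin, pvALoop, if_pos h]
  by_cases hc : c = ':' <;> simp [hc]

lemma pvAFin_suite2 (cs : List Char) (prev : Option Char) (colons : Int) :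
    pvAFin cs prev colons 2 = false := by
  cases cs with
  | nil => simp [pvAFin_nil]
  | cons c rest => exact pvAFin_cons_stop rest colons (by tauto)

lemma pvA_char (cs : List Char) : ∀ colons : Int,
    (pvAFin cs none colons 1 = pvSpec false (3 - colons) cs)
    ∧ (pvAFin cs (some ':') colons 1 = pvSpec false (3 - colons) cs)
    ∧ (∀ c, c ≠ ':' → pvAFin cs (some c) colons 0 = pvSpec true (3 - colons) cs) := by
  induction cs with
  | nil =>
    intro colons
    refine ⟨?_, ?_, fun c _ => ?_⟩ <;> (simp [pvAFin_nil, pvSpec]; try omega)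
  | cons c rest ih =>
    intro colons
    by_cases hc : c = ':'
    · subst hc
      have hgo : ∀ prev : Option Char, ¬(prev.isSome ∧ (':' : Char) = '-' ∧ prev ≠ some ':') := by
        intro prev ⟨_, h2, _⟩; exact absurd h2 (by decide)
      have step : ∀ prev : Option Char,
          pvAFin (':' :: rest) prev colons 1 = pvAFin rest (some ':') (colons + 1) 2 := by
        intro prev
        rw [pvAFin_cons_go rest colons ⟨by decide, by decide, hgo prev⟩]
        simp
      refine ⟨?_, ?_, fun c' hc' => ?_⟩
      · rw [step, pvAFin_suite2]; simp [pvSpec]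
      · rw [step, pvAFin_suite2]; simp [pvSpec]
      · -- entering on ':' with an open segment: consume it and continue
        have hrec := (ih (colons + 1)).2.1
        rw [pvAFin_cons_go rest colons ⟨by decide, by decide, hgo _⟩]
        simp [pvSpec]
        rw [hrec]
        congr 1
        omega
    · by_cases hm : c = '-'
      · subst hm
        have hrec := (ih colons).2.2 '-' (by decide)
        refine ⟨?_, ?_, fun c' hc' => ?_⟩
        · rw [pvAFin_cons_go rest colons ⟨by decide, by decide, by simp⟩]
          simp [pvSpec, hrec]
        · rw [pvAFin_cons_go rest colons ⟨by decide, by decide, by simp⟩]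
          simp [pvSpec, hrec]
        · rw [pvAFin_cons_stop rest colons
                (fun hg => hg.2.2 ⟨rfl, rfl, by simpa using hc'⟩)]
          simp [pvSpec]
      · by_cases hd : pvIsDigit c = true
        · have hmem : pvIsSeedChar c = true := (pvSeedChar_iff c).mpr (Or.inl hd)
          have hrec := (ih colons).2.2 c hc
          have hnm : ∀ prev : Option Char, ¬(prev.isSome ∧ c = '-' ∧ prev ≠ some ':') := by
            intro prev ⟨_, h2, _⟩; exact hm h2
          refine ⟨?_, ?_, fun c' hc' => ?_⟩ <;>
            · rw [pvAFin_cons_go rest colons ⟨hmem, by decide, hnm _⟩]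
              simp [pvSpec, hc, hm, hd, hrec]
        · have hmem : pvIsSeedChar c ≠ true := by
            intro h
            rcases (pvSeedChar_iff c).mp h with h | h | h
            exacts [hd h, hm h, hc h]
          have hnd : pvIsDigit c = false := by
            cases hpv : pvIsDigit c
            · rfl
            · exact absurd ((pvSeedChar_iff c).mpr (Or.inl hpv)) hmem
          refine ⟨?_, ?_, fun c' hc' => ?_⟩ <;>
            · rw [pvAFin_cons_stop rest colons (by tauto)]
              simp [pvSpec, hc, hm, hnd]

-- B side: the split on ':' against the reference automaton
def pvParts (cs : List Char) : List (List Char) := List.splitOnP (fun x => x == ':') cs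

lemma pvParts_eq_splitOn (cs : List Char) : cs.splitOn ':' = pvParts cs := by
  simp [pvParts, List.splitOn]

lemma pvParts_nil : pvParts [] = [[]] := by
  simp [pvParts]

lemma pvParts_cons_colon (rest : List Char) :
    pvParts (':' :: rest) = [] :: pvParts rest := by
  simp [pvParts, List.splitOnP_cons]

lemma pvParts_cons_other {c : Char} (hc : c ≠ ':') (rest : List Char)
    {h : List Char} {tl : List (List Char)} (hsp : pvParts rest = h :: tl) :
    pvParts (c :: rest) = (c :: h) :: tl := by
  simp [pvParts, List.splitOnP_cons, hc, show List.splitOnP (fun x => x == ':') rest = h :: tl from hsp]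

lemma pvParts_ne_nil (cs : List Char) : pvParts cs ≠ [] :=
  List.splitOnP_ne_nil _ cs

lemma pvInt_decide_succ (n : Nat) (t : Int) :
    decide (((n + 1 : Nat) : Int) = t + 1) = decide ((n : Int) = (t - 1) + 1) := by
  rw [Bool.eq_iff_iff]
  simp

lemma pvB_char (cs : List Char) : ∀ t : Int,
    (pvSpec false t cs
      = (decide (((pvParts cs).length : Int) = t + 1) && (pvParts cs).all pvOkSeg))
    ∧ (pvSpec true t cs
      = (decide (((pvParts cs).length : Int) = t + 1)
          && (pvParts cs).headI.all pvIsDigit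
          && (pvParts cs).tail.all pvOkSeg)) := by
  induction cs with
  | nil =>
    intro t
    rw [pvParts_nil]
    constructor
    · simp [pvSpec, pvOkSeg]
    · simp [pvSpec]
      rfl
  | cons c rest ih =>
    intro t
    by_cases hc : c = ':'
    · subst hc
      rw [pvParts_cons_colon]
      have hS := (ih (t - 1)).1
      constructor
      · simp [pvSpec, pvOkSeg]
      · rw [show pvSpec true t (':' :: rest) = pvSpec false (t - 1) rest from by simp [pvSpec]]
        rw [hS, List.length_cons, pvInt_decide_succ]
        simp
    · obtain ⟨h, tl, hsp⟩ := List.exists_cons_of_ne_nil (pvParts_ne_nil rest)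
      rw [pvParts_cons_other hc rest hsp]
      have hI := (ih t).2
      rw [hsp] at hI
      simp only [List.headI, List.tail] at hI
      have hok : pvOkSeg (c :: h) = (if c = '-' then h.all pvIsDigit
                                     else pvIsDigit c && h.all pvIsDigit) := by
        by_cases hm : c = '-' <;> simp [pvOkSeg, hm]
      by_cases hm : c = '-'
      · subst hm
        have hndm : pvIsDigit '-' = false := by decide
        constructor
        · simp only [pvSpec, if_neg hc, Bool.not_false, Bool.true_and, hI,
            List.all_cons, hok, List.length_cons]
          simp [Bool.and_assoc]
        · simp only [pvSpec, if_neg hc, Bool.not_true, Bool.false_and,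
            List.headI, List.all_cons, hndm, List.length_cons]
          simp
      · constructor
        · simp only [pvSpec, if_neg hc, hI, List.all_cons, hok, if_neg hm,
            List.length_cons]
          cases pvIsDigit c <;> cases h.all pvIsDigit <;> cases tl.all pvOkSeg <;> simp
        · simp only [pvSpec, if_neg hc, if_neg hm, hI, List.headI, List.all_cons,
            List.tail, List.length_cons]
          cases pvIsDigit c <;> cases h.all pvIsDigit <;> cases tl.all pvOkSeg <;> simp

-- ===== VERDICT (by name: the statement is the Claim_ definition above) =====
theorem f_is_it_a_seed_spec : Claim_equal_f_is_it_a_seed := by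
  intro s _
  unfold Spec_f_is_it_a_seed
  have hA : f_is_it_a_seed s = pvSpec false 3 s.toList := by
    have h0 := (pvA_char s.toList 0).1
    simpa [pvAFin, f_is_it_a_seed] using h0
  have hB := (pvB_char s.toList 3).1
  rw [hA, hB]
  unfold f_is_it_a_seed_alt
  rw [pvParts_eq_splitOn]
  congr 1
  rw [Bool.eq_iff_iff]
  simp
  omega
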